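-- pv_equiv track=rewrite | github.com/Saubhik-Som/NPTEL-PDSA-cs70 | Week 2 live session.py | threesquares
-- ===== SOURCE A (Python) =====
-- def threesquares(m):
--     if m<0:
--         return False
--     for a in range(0,m+1):
--         for b in range (0,m+1):
--             n = 4**a*(8*b + 7) #from Legendre's three-square theorem
--             if n==m:
--                 return False
--     return True
-- ===== SOURCE B (Python) =====
-- def threesquares(m):
--     if m < 0:
--         return False
--     while m > 0 and m % 4 == 0:
--         m //= 4
--     return m % 8 != 7
-- ===== Notes on version B (the rewrite author's own statement) =====
-- stated objective: faster
-- what changed: B replaces A's exhaustive nested search over all pairs (a,b) in [0,m]^2 for 4^a*(8b+7)==m by repeatedly dividing out factors of 4 and checking the residue mod 8.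
import Mathlib
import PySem

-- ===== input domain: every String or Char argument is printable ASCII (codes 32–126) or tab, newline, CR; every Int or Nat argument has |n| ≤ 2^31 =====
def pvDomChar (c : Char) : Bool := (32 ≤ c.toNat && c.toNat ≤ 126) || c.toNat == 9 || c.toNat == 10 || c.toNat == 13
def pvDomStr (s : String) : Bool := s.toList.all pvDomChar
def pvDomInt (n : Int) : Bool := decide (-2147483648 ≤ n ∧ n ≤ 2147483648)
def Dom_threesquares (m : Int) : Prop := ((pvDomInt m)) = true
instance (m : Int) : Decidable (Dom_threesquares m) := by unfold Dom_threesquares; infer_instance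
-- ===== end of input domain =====

-- B replaces A's nested search over all (a,b) in [0,m]^2 by dividing out factors of 4 and one residue check (asymptotically faster).

-- ===== PORT A =====
-- inner loop: `for b in range(0,m+1): if 4**a*(8*b+7)==m: return False`
-- (a comes from range(0,m+1), so 0 ≤ a and `4**a` is ported as 4 ^ a.toNat — exact there)
def pvAInner (m a : Int) : List Int → Bool
  | [] => true
  | b :: bs => if 4 ^ a.toNat * (8 * b + 7) = m then false else pvAInner m a bs

-- outer loop: `for a in range(0,m+1): <inner loop>`
def pvAOuter (m : Int) : List Int → Bool
  | [] => true
  | a :: as =>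
    if pvAInner m a (PySem.List.pyRange 0 (m + 1)) = false then false
    else pvAOuter m as

def threesquares (m : Int) : Bool :=
  if m < 0 then false
  else pvAOuter m (PySem.List.pyRange 0 (m + 1))

-- ===== PORT B =====
-- `while m > 0 and m % 4 == 0: m //= 4`
def pvBReduce (m : Int) : Int :=
  if h : 0 < m ∧ PySem.Int.mod m 4 = 0 then pvBReduce (PySem.Int.floordiv m 4) else m
termination_by m.toNat
decreasing_by
  rw [PySem.Int.floordiv_eq_ediv_of_pos (by norm_num : (0:Int) < 4)]
  have h1 : m / 4 * 4 ≤ m := Int.ediv_mul_le m (by norm_num)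
  have h2 : 0 ≤ m / 4 := Int.ediv_nonneg (le_of_lt h.1) (by norm_num)
  omega

def threesquares_alt (m : Int) : Bool :=
  if m < 0 then false
  else PySem.Int.mod (pvBReduce m) 8 != 7

-- ===== PRECONDITION & SPEC =====
def Spec_threesquares (m : Int) (out : Bool) : Prop := out = threesquares_alt m
instance (m : Int) (out : Bool) : Decidable (Spec_threesquares m out) := by unfold Spec_threesquares; infer_instance

-- ===== CLAIM (what is proved, stated in full; the proofs are below) =====
def Claim_equal_threesquares : Prop := ∀ (m : Int), Dom_threesquares m → Spec_threesquares m (threesquares m)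

-- ===== LEMMAS AND PROOFS =====

-- the common mathematical content: m is of the form 4^a * (8b+7)
def pvP (m : Int) : Prop := ∃ a b : ℕ, (4:Int) ^ a * (8 * (b:Int) + 7) = m

lemma pvAInner_false_iff (m a : Int) (bs : List Int) :
    pvAInner m a bs = false ↔ ∃ b ∈ bs, (4:Int) ^ a.toNat * (8 * b + 7) = m := by
  induction bs with
  | nil => simp [pvAInner]
  | cons b bs ih =>
    simp only [pvAInner]
    split_ifs with h
    · simp [h]
    · simp [ih, h]

lemma pvAOuter_false_iff (m : Int) (as : List Int) :
    pvAOuter m as = false ↔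
      ∃ a ∈ as, ∃ b ∈ PySem.List.pyRange 0 (m + 1), (4:Int) ^ a.toNat * (8 * b + 7) = m := by
  induction as with
  | nil => simp [pvAOuter]
  | cons a as ih =>
    simp only [pvAOuter]
    split_ifs with h
    · rw [pvAInner_false_iff] at h
      rcases h with ⟨b, hbm, hb⟩
      exact iff_of_true rfl ⟨a, List.mem_cons_self, b, hbm, hb⟩
    · have h' : ¬ ∃ b ∈ PySem.List.pyRange 0 (m + 1), (4:Int) ^ a.toNat * (8 * b + 7) = m := by
        rw [← pvAInner_false_iff]
        simpa using h
      rw [ih]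
      constructor
      · rintro ⟨a', ha', hb⟩
        exact ⟨a', List.mem_cons_of_mem _ ha', hb⟩
      · rintro ⟨a', ha', hb⟩
        rcases List.mem_cons.mp ha' with rfl | ha''
        · exact absurd hb h'
        · exact ⟨a', ha'', hb⟩

-- A's bounded search finds a witness iff an unbounded one exists
lemma pvA_false_iff (m : Int) : pvAOuter m (PySem.List.pyRange 0 (m + 1)) = false ↔ pvP m := by
  rw [pvAOuter_false_iff]
  constructor
  · rintro ⟨a, _, b, hbmem, hab⟩
    rcases PySem.List.mem_pyRange_one.mp hbmem with ⟨hb0, _⟩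
    refine ⟨a.toNat, b.toNat, ?_⟩
    rwa [Int.toNat_of_nonneg hb0]
  · rintro ⟨a, b, hab⟩
    have h4 : (7:Int) ≤ 8 * (b:Int) + 7 := by omega
    have hpow1 : (1:Int) ≤ 4 ^ a := one_le_pow₀ (by norm_num)
    have hble : 8 * (b:Int) + 7 ≤ m := by
      calc 8 * (b:Int) + 7 = 1 * (8 * (b:Int) + 7) := by ring
        _ ≤ 4 ^ a * (8 * (b:Int) + 7) := by
            apply mul_le_mul_of_nonneg_right hpow1 (by positivity)
        _ = m := hab
    have hale : (4:Int) ^ a ≤ m := by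
      calc (4:Int) ^ a = 4 ^ a * 1 := by ring
        _ ≤ 4 ^ a * (8 * (b:Int) + 7) := by
            apply mul_le_mul_of_nonneg_left (by omega) (by positivity)
        _ = m := hab
    have haa : (a:Int) < 4 ^ a := by
      have := Nat.lt_pow_self (a := 4) (n := a) (by norm_num)
      exact_mod_cast this
    have ham : (a:Int) < m := lt_of_lt_of_le haa hale
    refine ⟨(a:Int), ?_, (b:Int), ?_, ?_⟩
    · exact PySem.List.mem_pyRange_one.mpr ⟨Int.natCast_nonneg a, by omega⟩
    · exact PySem.List.mem_pyRange_one.mpr ⟨Int.natCast_nonneg b, by omega⟩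
    · rwa [Int.toNat_natCast]

-- characterisation of B's reduction loop
lemma pvBReduce_spec (m : Int) (hm : 0 ≤ m) :
    ∃ a : ℕ, m = 4 ^ a * pvBReduce m ∧ 0 ≤ pvBReduce m ∧ (0 < pvBReduce m → ¬ (4 ∣ pvBReduce m)) := by
  induction m using pvBReduce.induct with
  | case1 m h ih =>
    rw [PySem.Int.floordiv_eq_ediv_of_pos (by norm_num : (0:Int) < 4)] at *
    have hdvd : (4:Int) ∣ m := (PySem.Int.mod_eq_zero_iff_dvd m 4).mp h.2
    have hq : 0 ≤ m / 4 := Int.ediv_nonneg (le_of_lt h.1) (by norm_num)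
    rcases ih hq with ⟨a, heq, hnn, hnd⟩
    refine ⟨a + 1, ?_, ?_, ?_⟩
    · rw [pvBReduce]
      simp only [h, and_self, dite_true]
      rw [PySem.Int.floordiv_eq_ediv_of_pos (by norm_num : (0:Int) < 4)]
      calc m = 4 * (m / 4) := (Int.mul_ediv_cancel' hdvd).symm
        _ = 4 * (4 ^ a * pvBReduce (m / 4)) := by rw [← heq]
        _ = 4 ^ (a + 1) * pvBReduce (m / 4) := by ring
    · rw [pvBReduce]
      simp only [h, and_self, dite_true]
      rw [PySem.Int.floordiv_eq_ediv_of_pos (by norm_num : (0:Int) < 4)]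
      exact hnn
    · rw [pvBReduce]
      simp only [h, and_self, dite_true]
      rw [PySem.Int.floordiv_eq_ediv_of_pos (by norm_num : (0:Int) < 4)]
      exact hnd
  | case2 m h =>
    refine ⟨0, ?_, ?_, ?_⟩ <;> rw [pvBReduce] <;> simp only [h, dite_false]
    · ring
    · exact hm
    · intro hpos hdvd
      exact h ⟨hpos, (PySem.Int.mod_eq_zero_iff_dvd m 4).mpr hdvd⟩

lemma pvBReduce_of_form (a : ℕ) (r : Int) (hr : 0 < r) (hnd : ¬ (4 ∣ r)) :
    pvBReduce ((4:Int) ^ a * r) = r := by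
  induction a with
  | zero =>
    simp only [pow_zero, one_mul]
    rw [pvBReduce]
    have hc : ¬ (0 < r ∧ PySem.Int.mod r 4 = 0) := by
      rintro ⟨-, hm4⟩
      exact hnd ((PySem.Int.mod_eq_zero_iff_dvd r 4).mp hm4)
    rw [dif_neg hc]
  | succ a ih =>
    rw [pvBReduce]
    have hpos : 0 < (4:Int) ^ (a + 1) * r := by positivity
    have hdvd : (4:Int) ∣ (4:Int) ^ (a + 1) * r := ⟨4 ^ a * r, by ring⟩
    have hmod : PySem.Int.mod ((4:Int) ^ (a + 1) * r) 4 = 0 :=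
      (PySem.Int.mod_eq_zero_iff_dvd _ 4).mpr hdvd
    simp only [hpos, hmod, and_self, dite_true]
    rw [PySem.Int.floordiv_eq_ediv_of_pos (by norm_num : (0:Int) < 4)]
    have : (4:Int) ^ (a + 1) * r / 4 = 4 ^ a * r := by
      rw [pow_succ]
      rw [show (4:Int) ^ a * 4 * r = 4 * (4 ^ a * r) by ring]
      exact Int.mul_ediv_cancel_left _ (by norm_num)
    rw [this]
    exact ih

-- the bridge: for 0 ≤ m, the form exists iff the reduced value is ≡ 7 (mod 8)
lemma pvP_iff (m : Int) (hm : 0 ≤ m) : pvP m ↔ pvBReduce m % 8 = 7 := by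
  constructor
  · rintro ⟨a, b, hab⟩
    have hr7 : (0:Int) < 8 * (b:Int) + 7 := by positivity
    have hnd : ¬ ((4:Int) ∣ 8 * (b:Int) + 7) := by omega
    rw [← hab, pvBReduce_of_form a _ hr7 hnd]
    omega
  · intro h7
    rcases pvBReduce_spec m hm with ⟨a, heq, hnn, _⟩
    refine ⟨a, (pvBReduce m / 8).toNat, ?_⟩
    have h0 : 0 ≤ pvBReduce m / 8 := Int.ediv_nonneg hnn (by norm_num)
    rw [Int.toNat_of_nonneg h0]
    have h8 : 8 * (pvBReduce m / 8) + 7 = pvBReduce m := by omega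
    rw [h8]
    exact heq.symm

lemma pv_main (m : Int) : threesquares m = threesquares_alt m := by
  unfold threesquares threesquares_alt
  split_ifs with hneg
  · rfl
  · rw [not_lt] at hneg
    have hiff := (pvA_false_iff m).trans (pvP_iff m hneg)
    rw [PySem.Int.mod_eq_emod_of_pos (by norm_num : (0:Int) < 8)]
    cases hA : pvAOuter m (PySem.List.pyRange 0 (m + 1)) with
    | false =>
      have h7 : pvBReduce m % 8 = 7 := hiff.mp hA
      simp [h7]
    | true =>
      have h7 : ¬ pvBReduce m % 8 = 7 := by
        intro h; rw [hiff.mpr h] at hA; exact Bool.noConfusion hA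
      simp [h7]

-- ===== VERDICT (by name: the statement is the Claim_ definition above) =====
theorem threesquares_spec : Claim_equal_threesquares := by
  intro m _
  unfold Spec_threesquares
  exact pv_main m
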